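-- pv_equiv track=rewrite | github.com/leehiufung911/cdxml-toolkit | cdxml_toolkit/name_decomposer.py | _insert_prefix_by_locant
-- ===== SOURCE A (Python) =====
-- def _insert_prefix_by_locant(name: str, locant: str,
--                               prefix_text: str) -> str:
--     """Insert '{locant}-{prefix_text}-' at the correct numerical position.
--
--     Scans top-level locants (skipping bracketed content) and inserts
--     before the first locant that is numerically greater than *locant*.
--
--     >>> _insert_prefix_by_locant('2-morpholino-4-phenylquinoline',
--     ...                          '3', '(phenylmethanol-yl)')
--     '2-morpholino-3-(phenylmethanol-yl)-4-phenylquinoline'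
--     """
--     target = int(locant)
--     depth = 0
--     i = 0
--     while i < len(name):
--         c = name[i]
--         if c in '([':
--             depth += 1
--             i += 1
--         elif c in ')]':
--             depth -= 1
--             i += 1
--         elif c.isdigit() and depth == 0:
--             j = i
--             while j < len(name) and name[j].isdigit():
--                 j += 1
--             if j < len(name) and name[j] == '-':
--                 num = int(name[i:j])
--                 if num > target:
--                     return (name[:i] + f"{locant}-{prefix_text}-"
--                             + name[i:])
--             i = j
--         else:
--             i += 1
--     # Fallback: prepend
--     return f"{locant}-{prefix_text}-" + name
-- ===== SOURCE B (Python) =====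
-- def _insert_prefix_by_locant(name: str, locant: str,
--                              prefix_text: str) -> str:
--     """Table-driven variant: precompute a bracket-depth table in one pass,
--     then scan candidate positions with a run-start predicate (no fused
--     state machine, no index jumping)."""
--     target = int(locant)
--     ins = f"{locant}-{prefix_text}-"
--     d, depth = 0, []
--     for c in name:
--         depth.append(d)
--         d += (c in '([') - (c in ')]')
--     for s in range(len(name)):
--         if depth[s] != 0 or not name[s].isdigit() or name[s-1:s].isdigit():
--             continue
--         e = s + _digit_run_length(name, s)
--         if name[e:e+1] == '-' and int(name[s:e]) > target:
--             return name[:s] + ins + name[s:]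
--     return ins + name
--
--
-- def _digit_run_length(name: str, s: int) -> int:
--     e = s
--     while e < len(name) and name[e].isdigit():
--         e += 1
--     return e - s
-- ===== Notes on version B (the rewrite author's own statement) =====
-- stated objective: alternative
-- what changed: A's single fused scan (mutable bracket depth, index jumping past digit runs) is replaced by a precomputed per-position bracket-depth table plus a flat scan over every index with a run-start predicate (digit whose predecessor is not a digit) checked against the table.
-- outside the precondition, e.g. on _insert_prefix_by_locant('2-x', 'a', 'p'): A raises ValueError, B raises ValueError
import Mathlib
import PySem

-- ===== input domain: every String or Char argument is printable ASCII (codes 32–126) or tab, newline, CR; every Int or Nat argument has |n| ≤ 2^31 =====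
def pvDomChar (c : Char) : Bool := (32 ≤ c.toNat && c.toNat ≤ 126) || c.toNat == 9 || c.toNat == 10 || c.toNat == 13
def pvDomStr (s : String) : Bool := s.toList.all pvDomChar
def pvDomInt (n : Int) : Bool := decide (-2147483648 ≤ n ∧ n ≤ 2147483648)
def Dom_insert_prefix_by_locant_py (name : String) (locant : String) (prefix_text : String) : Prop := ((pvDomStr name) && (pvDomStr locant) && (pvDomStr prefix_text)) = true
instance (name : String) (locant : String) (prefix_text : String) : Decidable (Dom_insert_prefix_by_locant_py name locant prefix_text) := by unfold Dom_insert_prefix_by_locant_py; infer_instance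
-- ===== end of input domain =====

-- B replaces A's fused state machine (mutable depth + index jumping) by a precomputed
-- bracket-depth table and a flat scan over all positions with a run-start predicate
-- (objective: alternative decomposition, same cost); return values only, no mutation.

-- ===== PORT A =====
-- inner loop of A: 'while j < len(name) and name[j].isdigit(): j += 1'
-- (name[j] rendered as getD: the index is guarded in range by the condition itself)
def pvRunEndA (cs : List Char) (j : Nat) : Nat :=
  if h : j < cs.length ∧ PySem.Chars.isdigit (cs.getD j ' ') then pvRunEndA cs (j + 1)
  else j
termination_by cs.length - j
decreasing_by omega

-- the next two lemmas are needed by pvLoopA's termination proof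
lemma le_pvRunEndA (cs : List Char) (j : Nat) : j ≤ pvRunEndA cs j := by
  fun_induction pvRunEndA <;> omega

lemma lt_pvRunEndA (cs : List Char) (i : Nat) (h : i < cs.length)
    (hd : PySem.Chars.isdigit (cs.getD i ' ')) : i < pvRunEndA cs i := by
  rw [pvRunEndA, dif_pos ⟨h, hd⟩]
  have := le_pvRunEndA cs (i + 1); omega

-- the main 'while i < len(name)' of A, state (i, depth); c = name[i] and j = runEnd inlined
def pvLoopA (cs : List Char) (target : Int) (ins : List Char) (i : Nat) (depth : Int) :
    List Char :=
  if h : i < cs.length then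
    if cs.getD i ' ' = '(' ∨ cs.getD i ' ' = '[' then
      pvLoopA cs target ins (i + 1) (depth + 1)
    else if cs.getD i ' ' = ')' ∨ cs.getD i ' ' = ']' then
      pvLoopA cs target ins (i + 1) (depth - 1)
    else if h3 : PySem.Chars.isdigit (cs.getD i ' ') ∧ depth = 0 then
      -- 'if j < len(name) and name[j] == '-':  num = int(name[i:j]);  if num > target: return …'
      if pvRunEndA cs i < cs.length ∧ cs.getD (pvRunEndA cs i) ' ' = '-' ∧
          (PySem.Int.ofChars? (PySem.List.slice cs (some (i : Int))
            (some ((pvRunEndA cs i : Nat) : Int)))).getD 0 > target then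
        PySem.List.slice cs none (some (i : Int)) ++ ins ++
          PySem.List.slice cs (some (i : Int)) none
      else pvLoopA cs target ins (pvRunEndA cs i) depth
    else pvLoopA cs target ins (i + 1) depth
  else ins ++ cs
termination_by cs.length - i
decreasing_by
  · omega
  · omega
  · have := lt_pvRunEndA cs i h h3.1; omega
  · omega

def insert_prefix_by_locant_py (name : String) (locant : String) (prefix_text : String) :
    String :=
  -- 'target = int(locant)' raises ValueError on non-int-like locant: outside Pre_; .getD 0 arbitrary there
  String.ofList (pvLoopA name.toList ((PySem.Int.ofStr? locant).getD 0)
    (locant.toList ++ '-' :: (prefix_text.toList ++ ['-']))  -- f"{locant}-{prefix_text}-"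
    0 0)

-- ===== PORT B =====
-- '(c in "([") - (c in ")]")'
def pvDelta (c : Char) : Int :=
  (if c = '(' ∨ c = '[' then 1 else 0) - (if c = ')' ∨ c = ']' then 1 else 0)

-- the depth-table pass of B
def pvDepthTable (cs : List Char) : List Int :=
  (cs.foldl (fun (p : List Int × Int) c => (p.1 ++ [p.2], p.2 + pvDelta c)) ([], 0)).1

-- helper _digit_run_length of B: 'while e < len(name) and name[e].isdigit(): e += 1'
def pvRunScanB (cs : List Char) (e : Nat) : Nat :=
  if h : e < cs.length ∧ PySem.Chars.isdigit (cs.getD e ' ') then pvRunScanB cs (e + 1)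
  else e
termination_by cs.length - e
decreasing_by omega

def pvDigitRunLength (cs : List Char) (s : Nat) : Nat := pvRunScanB cs s - s

-- 'for s in range(len(name)): …' with early return; falls through to the prepend;
-- e = s + _digit_run_length(name, s) inlined
def pvLoopB (cs : List Char) (depths : List Int) (target : Int) (ins : List Char) (s : Nat) :
    List Char :=
  if h : s < cs.length then
    if depths.getD s 0 ≠ 0 ∨ ¬ PySem.Chars.isdigit (cs.getD s ' ') ∨
        PySem.Chars.strIsdigit
          (PySem.List.slice cs (some ((s : Int) - 1)) (some (s : Int))) = true then
      pvLoopB cs depths target ins (s + 1)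
    else
      if PySem.List.slice cs (some ((s + pvDigitRunLength cs s : Nat) : Int))
            (some (((s + pvDigitRunLength cs s : Nat) : Int) + 1)) = ['-'] ∧
          (PySem.Int.ofChars? (PySem.List.slice cs (some (s : Int))
            (some ((s + pvDigitRunLength cs s : Nat) : Int)))).getD 0 > target then
        PySem.List.slice cs none (some (s : Int)) ++ ins ++
          PySem.List.slice cs (some (s : Int)) none
      else pvLoopB cs depths target ins (s + 1)
  else ins ++ cs
termination_by cs.length - s

def insert_prefix_by_locant_py_alt (name : String) (locant : String) (prefix_text : String) :
    String :=
  String.ofList (pvLoopB name.toList (pvDepthTable name.toList)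
    ((PySem.Int.ofStr? locant).getD 0)
    (locant.toList ++ '-' :: (prefix_text.toList ++ ['-'])) 0)

-- ===== PRECONDITION & SPEC =====
-- Pre_ excludes exactly the inputs where 'int(locant)' raises ValueError (both programs raise there)
def Pre_insert_prefix_by_locant_py (name : String) (locant : String) (prefix_text : String) :
    Prop := (PySem.Int.ofStr? locant).isSome = true
instance (name : String) (locant : String) (prefix_text : String) :
    Decidable (Pre_insert_prefix_by_locant_py name locant prefix_text) := by
  unfold Pre_insert_prefix_by_locant_py; infer_instance

def pvWitness_insert_prefix_by_locant_py : String × String × String :=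
  ("2-morpholino-4-phenylquinoline", "3", "(phenylmethanol-yl)")

def Spec_insert_prefix_by_locant_py (name : String) (locant : String) (prefix_text : String) (out : String) : Prop := out = insert_prefix_by_locant_py_alt name locant prefix_text
instance (name : String) (locant : String) (prefix_text : String) (out : String) : Decidable (Spec_insert_prefix_by_locant_py name locant prefix_text out) := by unfold Spec_insert_prefix_by_locant_py; infer_instance

-- ===== CLAIM (what is proved, stated in full; the proofs are below) =====
def Claim_equal_insert_prefix_by_locant_py : Prop := ∀ (name : String) (locant : String) (prefix_text : String), Dom_insert_prefix_by_locant_py name locant prefix_text → Pre_insert_prefix_by_locant_py name locant prefix_text → Spec_insert_prefix_by_locant_py name locant prefix_text (insert_prefix_by_locant_py name locant prefix_text)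

-- ===== LEMMAS AND PROOFS =====

-- depth of the prefix of length k
def pvDepthAt (cs : List Char) (k : Nat) : Int := ((cs.take k).map pvDelta).sum

lemma pvDepthAt_zero (cs : List Char) : pvDepthAt cs 0 = 0 := by simp [pvDepthAt]

lemma pvDepthAt_succ (cs : List Char) (k : Nat) (hk : k < cs.length) :
    pvDepthAt cs (k + 1) = pvDepthAt cs k + pvDelta (cs.getD k ' ') := by
  unfold pvDepthAt
  rw [List.take_add_one, List.map_append, List.sum_append]
  simp [List.getD_eq_getElem?_getD, List.getElem?_eq_getElem hk]

lemma pvDepthTable_spec (cs : List Char) : ∀ (l : List Int) (d : Int),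
    (cs.foldl (fun (p : List Int × Int) c => (p.1 ++ [p.2], p.2 + pvDelta c)) (l, d)).1
      = l ++ (List.range cs.length).map (fun k => d + pvDepthAt cs k) := by
  induction cs with
  | nil => intro l d; simp
  | cons c t ih =>
    intro l d
    simp only [List.foldl_cons]
    rw [ih]
    simp only [List.length_cons, List.range_succ_eq_map, List.map_cons, List.map_map]
    simp [pvDepthAt, List.append_assoc, Function.comp]
    intro a _
    ring

lemma pvDepthTable_getD (cs : List Char) (s : Nat) (hs : s < cs.length) :
    (pvDepthTable cs).getD s 0 = pvDepthAt cs s := by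
  unfold pvDepthTable
  rw [pvDepthTable_spec]
  simp [List.getD_eq_getElem?_getD, hs]

lemma pvDigit_not_bracket (c : Char) (hd : PySem.Chars.isdigit c) :
    ¬ (c = '(' ∨ c = '[') ∧ ¬ (c = ')' ∨ c = ']') := by
  constructor <;> rintro (rfl | rfl) <;> simp [PySem.Chars.isdigit] at hd

lemma pvDelta_of_not_bracket (c : Char) (h1 : ¬ (c = '(' ∨ c = '[')) (h2 : ¬ (c = ')' ∨ c = ']')) :
    pvDelta c = 0 := by simp [pvDelta, h1, h2]

lemma pvDelta_digit (c : Char) (hd : PySem.Chars.isdigit c) : pvDelta c = 0 := by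
  obtain ⟨h1, h2⟩ := pvDigit_not_bracket c hd
  exact pvDelta_of_not_bracket c h1 h2

lemma pvRunScanB_eq (cs : List Char) (e : Nat) : pvRunScanB cs e = pvRunEndA cs e := by
  fun_induction pvRunScanB with
  | case1 e h ih =>
    rw [ih]
    conv_rhs => rw [pvRunEndA]
    rw [dif_pos h]
  | case2 e h =>
    conv_rhs => rw [pvRunEndA]
    rw [dif_neg h]

lemma pvRunEnd_eq (cs : List Char) (s : Nat) : s + pvDigitRunLength cs s = pvRunEndA cs s := by
  unfold pvDigitRunLength
  rw [pvRunScanB_eq]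
  have := le_pvRunEndA cs s
  omega

lemma pvRunEndA_le_length (cs : List Char) (e : Nat) (he : e ≤ cs.length) :
    pvRunEndA cs e ≤ cs.length := by
  fun_induction pvRunEndA <;> omega

lemma pvRunEndA_digits (cs : List Char) (e : Nat) :
    ∀ m, e ≤ m → m < pvRunEndA cs e →
      m < cs.length ∧ PySem.Chars.isdigit (cs.getD m ' ') := by
  fun_induction pvRunEndA with
  | case1 e h ih =>
    intro m hm hlt
    rcases Nat.eq_or_lt_of_le hm with rfl | hm'
    · exact ⟨h.1, h.2⟩
    · exact ih m hm' hlt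
  | case2 e h => intro m hm hlt; omega

lemma pvRunEndA_end_not_digit (cs : List Char) (e : Nat)
    (h : pvRunEndA cs e < cs.length) :
    ¬ PySem.Chars.isdigit (cs.getD (pvRunEndA cs e) ' ') := by
  fun_induction pvRunEndA with
  | case1 e h' ih => exact ih h
  | case2 e h' =>
    intro hd
    exact h' ⟨h, hd⟩

lemma pvDepthAt_run (cs : List Char) (i : Nat) :
    ∀ k, i ≤ k → k ≤ pvRunEndA cs i → pvDepthAt cs k = pvDepthAt cs i := by
  intro k
  induction k with
  | zero =>
    intro h _
    have : i = 0 := by omega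
    rw [this]
  | succ k ihk =>
    intro hik hk
    rcases Nat.eq_or_lt_of_le hik with heq | hlt
    · rw [heq]
    · have hki : i ≤ k := by omega
      have hkr : k < pvRunEndA cs i := by omega
      obtain ⟨hklen, hkd⟩ := pvRunEndA_digits cs i k hki hkr
      rw [pvDepthAt_succ cs k hklen, ihk hki (by omega), pvDelta_digit _ hkd]
      ring

-- slice facts specific to B's boundary tests
lemma pvSlice_neg_one_zero (cs : List Char) :
    PySem.List.slice cs (some (-1)) (some 0) = [] := by
  simp [PySem.List.slice, PySem.List.clampIdx]

lemma pvSlice_pred (cs : List Char) (s : Nat) (h0 : 0 < s) (hs : s ≤ cs.length) :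
    PySem.List.slice cs (some ((s : Int) - 1)) (some (s : Int))
      = [cs.getD (s - 1) ' '] := by
  have hcast : ((s : Int) - 1) = ((s - 1 : Nat) : Int) := by omega
  rw [hcast, PySem.List.slice_natCast]
  have h1 : s - (s - 1) = 1 := by omega
  rw [h1, List.take_one, List.head?_drop]
  have hlt : s - 1 < cs.length := by omega
  simp [List.getElem?_eq_getElem hlt, List.getD_eq_getElem?_getD]

lemma pvSlice_one_dash (cs : List Char) (e : Nat) :
    (PySem.List.slice cs (some (e : Int)) (some ((e : Int) + 1)) = ['-'])
      ↔ (e < cs.length ∧ cs.getD e ' ' = '-') := by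
  have hcast : ((e : Int) + 1) = ((e + 1 : Nat) : Int) := by omega
  rw [hcast, PySem.List.slice_natCast]
  have h1 : e + 1 - e = 1 := by omega
  rw [h1, List.take_one, List.head?_drop]
  by_cases he : e < cs.length
  · simp [List.getElem?_eq_getElem he, List.getD_eq_getElem?_getD, he]
  · have hn : cs[e]? = none := List.getElem?_eq_none (by omega)
    simp [hn, he]

-- the invariant A's scan maintains at each loop head
def pvInv (cs : List Char) (i : Nat) : Prop :=
  i = 0 ∨ ¬ PySem.Chars.isdigit (cs.getD (i - 1) ' ') ∨ pvDepthAt cs i ≠ 0 ∨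
    ¬ PySem.Chars.isdigit (cs.getD i ' ')

-- B rejects every mid-run index in one step (its run-start predicate fails there)
lemma pvLoopB_midstep (cs : List Char) (depths : List Int) (target : Int) (ins : List Char)
    (k : Nat) (hk : k < cs.length) (h0 : 0 < k)
    (hd1 : PySem.Chars.isdigit (cs.getD (k - 1) ' ')) :
    pvLoopB cs depths target ins k = pvLoopB cs depths target ins (k + 1) := by
  rw [pvLoopB]
  have hsl := pvSlice_pred cs k h0 (by omega)
  have hcond : PySem.Chars.strIsdigit
      (PySem.List.slice cs (some ((k : Int) - 1)) (some (k : Int))) = true := by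
    rw [hsl]; simpa [PySem.Chars.strIsdigit] using hd1
  rw [dif_pos hk, if_pos (Or.inr (Or.inr hcond))]

lemma pvLoopB_run (cs : List Char) (depths : List Int) (target : Int) (ins : List Char)
    (i : Nat) : ∀ (n k : Nat), pvRunEndA cs i - k ≤ n → i < k → k ≤ pvRunEndA cs i →
      pvLoopB cs depths target ins k = pvLoopB cs depths target ins (pvRunEndA cs i) := by
  intro n
  induction n with
  | zero =>
    intro k h hik hkr
    have : k = pvRunEndA cs i := by omega
    rw [this]
  | succ n ihn =>
    intro k h hik hkr
    rcases Nat.eq_or_lt_of_le hkr with rfl | hklt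
    · rfl
    · obtain ⟨hklen, _⟩ := pvRunEndA_digits cs i k (by omega) hklt
      have hprev := (pvRunEndA_digits cs i (k - 1) (by omega) (by omega)).2
      rw [pvLoopB_midstep cs depths target ins k hklen (by omega) hprev]
      exact ihn (k + 1) (by omega) (by omega) (by omega)

lemma pvMain (cs : List Char) (target : Int) (ins : List Char) :
    ∀ (m i : Nat), cs.length - i ≤ m → pvInv cs i →
      pvLoopA cs target ins i (pvDepthAt cs i)
        = pvLoopB cs (pvDepthTable cs) target ins i := by
  intro m
  induction m with
  | zero =>
    intro i hm _
    rw [pvLoopA, pvLoopB]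
    have h : ¬ i < cs.length := by omega
    rw [dif_neg h, dif_neg h]
  | succ m ih =>
    intro i hm hinv
    by_cases h : i < cs.length
    case neg =>
      rw [pvLoopA, pvLoopB, dif_neg h, dif_neg h]
    rw [pvLoopA, pvLoopB, dif_pos h, dif_pos h]
    by_cases h1 : cs.getD i ' ' = '(' ∨ cs.getD i ' ' = '['
    · -- opening bracket: A bumps depth, B's predicate fails on 'not a digit'
      have hnd : ¬ PySem.Chars.isdigit (cs.getD i ' ') := by
        rcases h1 with h1 | h1 <;> rw [h1] <;> decide
      have hdelta : pvDelta (cs.getD i ' ') = 1 := by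
        rcases h1 with h1 | h1 <;> rw [h1] <;> decide
      rw [if_pos h1, if_pos (Or.inr (Or.inl hnd))]
      have hdep : pvDepthAt cs i + 1 = pvDepthAt cs (i + 1) := by
        rw [pvDepthAt_succ cs i h, hdelta]
      rw [hdep]
      exact ih (i + 1) (by omega) (Or.inr (Or.inl (by simpa using hnd)))
    rw [if_neg h1]
    by_cases h2 : cs.getD i ' ' = ')' ∨ cs.getD i ' ' = ']'
    · have hnd : ¬ PySem.Chars.isdigit (cs.getD i ' ') := by
        rcases h2 with h2 | h2 <;> rw [h2] <;> decide
      have hdelta : pvDelta (cs.getD i ' ') = -1 := by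
        rcases h2 with h2 | h2 <;> rw [h2] <;> decide
      rw [if_pos h2, if_pos (Or.inr (Or.inl hnd))]
      have hdep : pvDepthAt cs i - 1 = pvDepthAt cs (i + 1) := by
        rw [pvDepthAt_succ cs i h, hdelta]
        ring
      rw [hdep]
      exact ih (i + 1) (by omega) (Or.inr (Or.inl (by simpa using hnd)))
    rw [if_neg h2]
    by_cases h3 : PySem.Chars.isdigit (cs.getD i ' ') ∧ pvDepthAt cs i = 0
    · -- top-level digit-run start: both sides examine the same run
      rw [dif_pos h3]
      -- B's run-start predicate holds, so B does not skip
      have hdt : ¬ (pvDepthTable cs).getD i 0 ≠ 0 := by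
        rw [pvDepthTable_getD cs i h]
        simpa using h3.2
      have hslice : ¬ PySem.Chars.strIsdigit
          (PySem.List.slice cs (some ((i : Int) - 1)) (some (i : Int))) = true := by
        by_cases hi0 : i = 0
        · subst hi0
          rw [show ((0 : Nat) : Int) - 1 = -1 by norm_num,
            show ((0 : Nat) : Int) = 0 by norm_num, pvSlice_neg_one_zero]
          decide
        · have hnd1 : ¬ PySem.Chars.isdigit (cs.getD (i - 1) ' ') := by
            rcases hinv with hz | hx | hx | hx
            · exact absurd hz hi0
            · exact hx
            · exact absurd h3.2 hx
            · exact absurd h3.1 hx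
          rw [pvSlice_pred cs i (by omega) (by omega)]
          simpa [PySem.Chars.strIsdigit, List.getD_eq_getElem?_getD] using hnd1
      have hBskip : ¬ ((pvDepthTable cs).getD i 0 ≠ 0 ∨
          ¬ PySem.Chars.isdigit (cs.getD i ' ') = true ∨
          PySem.Chars.strIsdigit
            (PySem.List.slice cs (some ((i : Int) - 1)) (some (i : Int))) = true) := by
        rintro (hc | hc | hc)
        · exact hdt hc
        · exact hc h3.1
        · exact hslice hc
      rw [if_neg hBskip]
      rw [pvRunEnd_eq cs i]
      -- now both sides test the same hit condition on j = pvRunEndA cs i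
      have hj := lt_pvRunEndA cs i h h3.1
      have hjlen := pvRunEndA_le_length cs i (by omega)
      by_cases hhit : pvRunEndA cs i < cs.length ∧ cs.getD (pvRunEndA cs i) ' ' = '-' ∧
          (PySem.Int.ofChars? (PySem.List.slice cs (some (i : Int))
            (some ((pvRunEndA cs i : Nat) : Int)))).getD 0 > target
      · rw [if_pos hhit,
          if_pos ⟨(pvSlice_one_dash cs (pvRunEndA cs i)).mpr ⟨hhit.1, hhit.2.1⟩, hhit.2.2⟩]
      · have hBmiss : ¬ (PySem.List.slice cs (some ((pvRunEndA cs i : Nat) : Int))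
              (some (((pvRunEndA cs i : Nat) : Int) + 1)) = ['-'] ∧
            (PySem.Int.ofChars? (PySem.List.slice cs (some (i : Int))
              (some ((pvRunEndA cs i : Nat) : Int)))).getD 0 > target) := by
          rintro ⟨hs, hv⟩
          obtain ⟨hl, hc⟩ := (pvSlice_one_dash cs (pvRunEndA cs i)).mp hs
          exact hhit ⟨hl, hc, hv⟩
        rw [if_neg hhit, if_neg hBmiss]
        -- A continues at j with the same depth; B walks the run one index at a time
        have hdrun : pvDepthAt cs i = pvDepthAt cs (pvRunEndA cs i) := by
          rw [pvDepthAt_run cs i (pvRunEndA cs i) (by omega) (le_refl _)]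
        rw [hdrun, pvLoopB_run cs (pvDepthTable cs) target ins i
          (pvRunEndA cs i - (i + 1)) (i + 1) (by omega) (by omega) (by omega)]
        refine ih (pvRunEndA cs i) (by omega) ?_
        by_cases hjl : pvRunEndA cs i < cs.length
        · exact Or.inr (Or.inr (Or.inr (pvRunEndA_end_not_digit cs i hjl)))
        · refine Or.inr (Or.inr (Or.inr ?_))
          rw [List.getD_eq_getElem?_getD, List.getElem?_eq_none_iff.mpr (by omega)]
          decide
    · -- any other character (or a bracketed digit): both sides step to i+1
      rw [dif_neg h3]
      have hdelta : pvDelta (cs.getD i ' ') = 0 := pvDelta_of_not_bracket _ h1 h2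
      have hdep : pvDepthAt cs i = pvDepthAt cs (i + 1) := by
        rw [pvDepthAt_succ cs i h, hdelta]
        ring
      have hcond : (pvDepthTable cs).getD i 0 ≠ 0 ∨
          ¬ PySem.Chars.isdigit (cs.getD i ' ') ∨
          PySem.Chars.strIsdigit
            (PySem.List.slice cs (some ((i : Int) - 1)) (some (i : Int))) = true := by
        by_cases hd : PySem.Chars.isdigit (cs.getD i ' ')
        · refine Or.inl ?_
          rw [pvDepthTable_getD cs i h]
          exact fun hz => h3 ⟨hd, hz⟩
        · exact Or.inr (Or.inl hd)
      rw [if_pos hcond, hdep]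
      refine ih (i + 1) (by omega) ?_
      by_cases hd : PySem.Chars.isdigit (cs.getD i ' ')
      · refine Or.inr (Or.inr (Or.inl ?_))
        rw [← hdep]
        exact fun hz => h3 ⟨hd, hz⟩
      · exact Or.inr (Or.inl (by simpa using hd))

-- ===== VERDICT (by name: the statement is the Claim_ definition above) =====
theorem insert_prefix_by_locant_py_spec : Claim_equal_insert_prefix_by_locant_py := by
  intro name locant prefix_text _ _
  unfold Spec_insert_prefix_by_locant_py
  unfold insert_prefix_by_locant_py insert_prefix_by_locant_py_alt
  have h := pvMain name.toList ((PySem.Int.ofStr? locant).getD 0)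
    (locant.toList ++ '-' :: (prefix_text.toList ++ ['-'])) name.toList.length 0
    (by omega) (Or.inl rfl)
  rw [pvDepthAt_zero] at h
  rw [h]
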